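-- pv_equiv track=rewrite | github.com/DLamarG/MinFactorDist_Codewars_Challenge | min_factor_dist.py | shortest_intance
-- ===== SOURCE A (Python) =====
-- def shortest_intance(n):
--     factors = []
--     shortest_int = n
--     for num in range(1,(n+1)):
--         if n % num == 0:
--             factors.append(num)
--     for i in range(len(factors)-1):
--         if factors[i+1] - factors[i] < shortest_int:
--             shortest_int = factors[i+1] - factors[i]
--     return(shortest_int)
-- ===== SOURCE B (Python) =====
-- def shortest_intance(n):
--     # trial division up to sqrt(n): collect small divisors ascending and their
--     # cofactors; large[::-1] continues ascending, so no sort is needed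
--     small = []
--     large = []
--     d = 1
--     while d * d <= n:
--         if n % d == 0:
--             small.append(d)
--             q = n // d
--             if q != d:
--                 large.append(q)
--         d += 1
--     divs = small + large[::-1]
--     shortest_int = n
--     for i in range(len(divs) - 1):
--         if divs[i + 1] - divs[i] < shortest_int:
--             shortest_int = divs[i + 1] - divs[i]
--     return shortest_int
-- ===== Notes on version B (the rewrite author's own statement) =====
-- stated objective: faster
-- what changed: B replaces A's O(n) scan of every candidate 1..n by trial division up to sqrt(n) that collects each divisor together with its cofactor, so the sorted divisor list is built in O(sqrt(n)) without any sort before the same adjacent-gap scan.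
import Mathlib
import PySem

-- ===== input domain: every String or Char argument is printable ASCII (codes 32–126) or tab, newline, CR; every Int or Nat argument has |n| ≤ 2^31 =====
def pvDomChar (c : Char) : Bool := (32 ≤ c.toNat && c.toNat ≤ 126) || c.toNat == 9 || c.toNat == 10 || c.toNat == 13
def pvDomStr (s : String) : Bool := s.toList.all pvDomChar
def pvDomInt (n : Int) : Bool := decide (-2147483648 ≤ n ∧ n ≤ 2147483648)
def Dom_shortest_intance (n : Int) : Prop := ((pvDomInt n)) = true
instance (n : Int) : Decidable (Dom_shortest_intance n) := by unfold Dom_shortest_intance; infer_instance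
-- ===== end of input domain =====

-- B replaces A's O(n) scan of all candidates 1..n by trial division up to √n,
-- collecting divisor/cofactor pairs so the sorted divisor list needs no sort (objective: faster).

-- ===== PORT A =====
-- literal port of A: collect divisors of n by scanning 1..n, then scan adjacent gaps
def shortest_intance (n : Int) : Int :=
  let factors : List Int :=
    (PySem.List.pyRange 1 (n + 1) 1).foldl
      (fun acc num => if PySem.Int.mod n num == 0 then acc ++ [num] else acc) []
  -- indices i, i+1 are always in range here, so pyGetD's default is never used
  (PySem.List.pyRange 0 ((factors.length : Int) - 1) 1).foldl
    (fun s i =>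
      if PySem.List.pyGetD factors (i + 1) 0 - PySem.List.pyGetD factors i 0 < s then
        PySem.List.pyGetD factors (i + 1) 0 - PySem.List.pyGetD factors i 0
      else s) n

-- ===== PORT B =====
-- termination helper for the while loop: d*d ≤ n forces d ≤ n
theorem bLoop_le (n d : Int) (h : d * d ≤ n) : d ≤ n := by nlinarith [sq_nonneg d, sq_nonneg (d - 1)]

-- the 'while d*d <= n' loop of Source B, state = (small, large)
def bLoop (n d : Int) (small large : List Int) : List Int × List Int :=
  if h : d * d ≤ n then
    if PySem.Int.mod n d == 0 then
      let q := PySem.Int.floordiv n d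
      if q != d then bLoop n (d + 1) (small ++ [d]) (large ++ [q])
      else bLoop n (d + 1) (small ++ [d]) large
    else bLoop n (d + 1) small large
  else (small, large)
termination_by (n + 1 - d).toNat
decreasing_by all_goals (have := bLoop_le n d h; omega)

-- literal port of Source B: divisor pairs up to √n, then the same adjacent-gap scan
def shortest_intance_alt (n : Int) : Int :=
  let p := bLoop n 1 [] []
  let divs : List Int := p.1 ++ (PySem.List.slice? p.2 none none (-1)).getD []
  (PySem.List.pyRange 0 ((divs.length : Int) - 1) 1).foldl
    (fun s i =>
      if PySem.List.pyGetD divs (i + 1) 0 - PySem.List.pyGetD divs i 0 < s then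
        PySem.List.pyGetD divs (i + 1) 0 - PySem.List.pyGetD divs i 0
      else s) n

-- ===== PRECONDITION & SPEC =====
def Spec_shortest_intance (n : Int) (out : Int) : Prop := out = shortest_intance_alt n
instance (n : Int) (out : Int) : Decidable (Spec_shortest_intance n out) := by unfold Spec_shortest_intance; infer_instance

-- ===== CLAIM (what is proved, stated in full; the proofs are below) =====
def Claim_equal_shortest_intance : Prop := ∀ (n : Int), Dom_shortest_intance n → Spec_shortest_intance n (shortest_intance n)

-- ===== LEMMAS AND PROOFS =====

-- the small-divisor list bLoop accumulates, in closed form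
def sDivs (n d : Int) : List Int :=
  (PySem.List.pyRange d (n + 1) 1).filter (fun x => decide (x * x ≤ n) && (PySem.Int.mod n x == 0))

-- the cofactor list bLoop accumulates, in closed form
def lDivs (n d : Int) : List Int :=
  ((PySem.List.pyRange d (n + 1) 1).filter (fun x => decide (x * x < n) && (PySem.Int.mod n x == 0))).map
    (fun x => PySem.Int.floordiv n x)

-- cofactor basics: for 1 ≤ y ∣ n with 1 ≤ n, n/y is again a divisor in [1, n]
lemma pair_facts (n y : Int) (hy : 1 ≤ y) (hdy : y ∣ n) (hn : 1 ≤ n) :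
    (n / y) ∣ n ∧ 1 ≤ n / y ∧ n / y ≤ n ∧ y * (n / y) = n ∧ n / (n / y) = y := by
  have hq : y * (n / y) = n := Int.mul_ediv_cancel' hdy
  have hx1 : 1 ≤ n / y := by nlinarith
  refine ⟨Dvd.intro_left y (by linarith [hq]), hx1, by nlinarith, hq, ?_⟩
  have : (n / y) * y = n := by linarith [hq, mul_comm y (n / y)]
  calc n / (n / y) = ((n / y) * y) / (n / y) := by rw [this]
    _ = y := Int.mul_ediv_cancel_left y (by omega)

-- cofactors are strictly antitone on divisors
lemma cof_anti (n a b : Int) (ha : 1 ≤ a) (hab : a < b) (hda : a ∣ n) (hdb : b ∣ n)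
    (hn : 1 ≤ n) : n / b < n / a := by
  obtain ⟨_, hb1, _, hqb, _⟩ := pair_facts n b (by omega) hdb hn
  obtain ⟨_, ha1, _, hqa, _⟩ := pair_facts n a ha hda hn
  nlinarith

lemma mem_sDivs_props (n x : Int) (hx : x ∈ sDivs n 1) :
    1 ≤ x ∧ x < n + 1 ∧ x * x ≤ n ∧ x ∣ n := by
  unfold sDivs at hx
  simp only [List.mem_filter, PySem.List.mem_pyRange_one, Bool.and_eq_true,
    decide_eq_true_eq, beq_iff_eq, PySem.Int.mod_eq_zero_iff_dvd] at hx
  tauto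

lemma mem_lDivs_props (n x : Int) (hx : x ∈ lDivs n 1) :
    1 ≤ x ∧ x < n + 1 ∧ n < x * x ∧ x ∣ n := by
  unfold lDivs at hx
  simp only [List.mem_map, List.mem_filter, PySem.List.mem_pyRange_one, Bool.and_eq_true,
    decide_eq_true_eq, beq_iff_eq, PySem.Int.mod_eq_zero_iff_dvd] at hx
  obtain ⟨y, ⟨⟨hy1, _⟩, hyy, hdy⟩, hxy⟩ := hx
  have hn : 1 ≤ n := by nlinarith
  rw [PySem.Int.floordiv_eq_ediv_of_pos (by omega)] at hxy
  obtain ⟨hdx, hx1, hxn, hq, _⟩ := pair_facts n y hy1 hdy hn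
  subst hxy
  refine ⟨hx1, by omega, by nlinarith, hdx⟩

lemma pw_lDivs (n : Int) : (lDivs n 1).Pairwise (fun a b => b < a) := by
  unfold lDivs
  rw [List.pairwise_map]
  refine List.Pairwise.imp_of_mem ?_
    (List.Pairwise.filter _ (PySem.List.pairwise_lt_pyRange_one 1 (n + 1)))
  intro a b ha hb hab
  simp only [List.mem_filter, PySem.List.mem_pyRange_one, Bool.and_eq_true,
    decide_eq_true_eq, beq_iff_eq, PySem.Int.mod_eq_zero_iff_dvd] at ha hb
  obtain ⟨⟨ha1, _⟩, haa, hda⟩ := ha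
  obtain ⟨⟨hb1, _⟩, hbb, hdb⟩ := hb
  have hn : 1 ≤ n := by nlinarith
  rw [PySem.Int.floordiv_eq_ediv_of_pos (by omega : (0:Int) < a),
    PySem.Int.floordiv_eq_ediv_of_pos (by omega : (0:Int) < b)]
  exact cof_anti n a b ha1 hab hda hdb hn

lemma mem_combined (n x : Int) :
    (x ∈ sDivs n 1 ∨ x ∈ lDivs n 1) ↔ ((1 ≤ x ∧ x < n + 1) ∧ x ∣ n) := by
  constructor
  · rintro (hx | hx)
    · obtain ⟨h1, h2, _, h4⟩ := mem_sDivs_props n x hx; exact ⟨⟨h1, h2⟩, h4⟩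
    · obtain ⟨h1, h2, _, h4⟩ := mem_lDivs_props n x hx; exact ⟨⟨h1, h2⟩, h4⟩
  · rintro ⟨⟨hx1, hxn⟩, hdx⟩
    have hn : 1 ≤ n := by
      have := Int.le_of_dvd (by omega) hdx
      omega
    by_cases hxx : x * x ≤ n
    · left
      unfold sDivs
      simp only [List.mem_filter, PySem.List.mem_pyRange_one, Bool.and_eq_true,
        decide_eq_true_eq, beq_iff_eq, PySem.Int.mod_eq_zero_iff_dvd]
      exact ⟨⟨hx1, hxn⟩, hxx, hdx⟩
    · right
      unfold lDivs
      simp only [List.mem_map, List.mem_filter, PySem.List.mem_pyRange_one, Bool.and_eq_true,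
        decide_eq_true_eq, beq_iff_eq, PySem.Int.mod_eq_zero_iff_dvd]
      obtain ⟨hdy, hy1, hyn, hq, hback⟩ := pair_facts n x hx1 hdx hn
      refine ⟨n / x, ⟨⟨hy1, by omega⟩, ?_, hdy⟩, ?_⟩
      · nlinarith
      · rw [PySem.Int.floordiv_eq_ediv_of_pos (by omega)]
        exact hback

-- main list identity: B's divisor list equals A's
lemma divs_eq (n : Int) :
    sDivs n 1 ++ (lDivs n 1).reverse
      = (PySem.List.pyRange 1 (n + 1) 1).filter (fun num => PySem.Int.mod n num == 0) := by
  have pwS : (sDivs n 1).Pairwise (· < ·) :=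
    List.Pairwise.filter _ (PySem.List.pairwise_lt_pyRange_one 1 (n + 1))
  have pwF : ((PySem.List.pyRange 1 (n + 1) 1).filter
      (fun num => PySem.Int.mod n num == 0)).Pairwise (· < ·) :=
    List.Pairwise.filter _ (PySem.List.pairwise_lt_pyRange_one 1 (n + 1))
  have pwL : ((lDivs n 1).reverse).Pairwise (· < ·) := by
    rw [List.pairwise_reverse]
    exact pw_lDivs n
  have pwC : (sDivs n 1 ++ (lDivs n 1).reverse).Pairwise (· < ·) := by
    rw [List.pairwise_append]
    refine ⟨pwS, pwL, ?_⟩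
    intro a ha b hb
    obtain ⟨ha1, _, haa, _⟩ := mem_sDivs_props n a ha
    obtain ⟨hb1, _, hbb, _⟩ := mem_lDivs_props n b (List.mem_reverse.1 hb)
    nlinarith
  have ndC : (sDivs n 1 ++ (lDivs n 1).reverse).Nodup := pwC.imp ne_of_lt
  have ndF : ((PySem.List.pyRange 1 (n + 1) 1).filter
      (fun num => PySem.Int.mod n num == 0)).Nodup := pwF.imp ne_of_lt
  refine List.Perm.eq_of_pairwise' (pwC.imp le_of_lt) (pwF.imp le_of_lt) ?_
  refine (List.perm_ext_iff_of_nodup ndC ndF).2 ?_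
  intro x
  rw [List.mem_append, List.mem_reverse, mem_combined n x]
  simp only [List.mem_filter, PySem.List.mem_pyRange_one, beq_iff_eq,
    PySem.Int.mod_eq_zero_iff_dvd]

-- d*d ≤ n, d ≥ 1 and x ≥ d force x*x > n is impossible… stop lemmas
lemma sDivs_stop (n d : Int) (h1 : 1 ≤ d) (h : ¬ d * d ≤ n) : sDivs n d = [] := by
  apply List.filter_eq_nil_iff.2
  intro x hx
  have hd : d ≤ x := ((PySem.List.mem_pyRange_one).1 hx).1
  have : ¬ x * x ≤ n := by nlinarith
  simp [this]

lemma lDivs_stop (n d : Int) (h1 : 1 ≤ d) (h : ¬ d * d ≤ n) : lDivs n d = [] := by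
  unfold lDivs
  rw [List.map_eq_nil_iff, List.filter_eq_nil_iff]
  intro x hx
  have hd : d ≤ x := ((PySem.List.mem_pyRange_one).1 hx).1
  have : ¬ x * x < n := by nlinarith
  simp [this]

lemma sDivs_step (n d : Int) (h : d * d ≤ n) :
    sDivs n d = if (PySem.Int.mod n d == 0) then d :: sDivs n (d + 1) else sDivs n (d + 1) := by
  have hd : d < n + 1 := by have := bLoop_le n d h; omega
  unfold sDivs
  rw [PySem.List.pyRange_one_cons hd, List.filter_cons]
  simp [h]

lemma lDivs_step (n d : Int) (h : d * d ≤ n) :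
    lDivs n d = if (decide (d * d < n) && (PySem.Int.mod n d == 0)) then
        PySem.Int.floordiv n d :: lDivs n (d + 1) else lDivs n (d + 1) := by
  have hd : d < n + 1 := by have := bLoop_le n d h; omega
  unfold lDivs
  rw [PySem.List.pyRange_one_cons hd, List.filter_cons]
  split <;> simp_all

lemma cof_ne_iff (n d : Int) (h1 : 1 ≤ d) (hd : d ∣ n) (h : d * d ≤ n) :
    (PySem.Int.floordiv n d ≠ d) ↔ d * d < n := by
  rw [PySem.Int.floordiv_eq_ediv_of_pos (by omega)]
  have hq : d * (n / d) = n := Int.mul_ediv_cancel' hd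
  constructor
  · intro hne
    rcases lt_or_eq_of_le h with h' | h'
    · exact h'
    · exact absurd (by nlinarith : n / d = d) hne
  · intro hlt hne
    rw [hne] at hq; omega

lemma bLoop_spec (n : Int) : ∀ d small large, 1 ≤ d →
    bLoop n d small large = (small ++ sDivs n d, large ++ lDivs n d) := by
  intro d small large
  fun_induction bLoop n d small large with
  | case1 d small large h hm q hq ih =>
    intro hd
    have hdvd : d ∣ n := (PySem.Int.mod_eq_zero_iff_dvd n d).1 (by simpa using hm)
    have hlt : d * d < n := (cof_ne_iff n d hd hdvd h).1 (by simpa using hq)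
    rw [ih (by omega), sDivs_step n d h, lDivs_step n d h]
    simp [hm, hlt, q]
  | case2 d small large h hm q hq ih =>
    intro hd
    have hdvd : d ∣ n := (PySem.Int.mod_eq_zero_iff_dvd n d).1 (by simpa using hm)
    have hq' : PySem.Int.floordiv n d = d := by simpa using hq
    have hlt : ¬ d * d < n := fun hl => by
      have := (cof_ne_iff n d hd hdvd h).2 hl; exact this hq'
    rw [ih (by omega), sDivs_step n d h, lDivs_step n d h]
    simp [hm, hlt]
  | case3 d small large h hm ih =>
    intro hd
    rw [ih (by omega), sDivs_step n d h, lDivs_step n d h]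
    simp [hm]
  | case4 d small large h =>
    intro hd
    rw [sDivs_stop n d hd h, lDivs_stop n d hd h]
    simp


-- ===== VERDICT (by name: the statement is the Claim_ definition above) =====
theorem shortest_intance_spec : Claim_equal_shortest_intance := by
  intro n _
  unfold Spec_shortest_intance shortest_intance shortest_intance_alt
  rw [bLoop_spec n 1 [] [] le_rfl]
  simp [PySem.List.slice?_none_none_neg_one, PySem.List.foldl_append_ite_eq_filter, divs_eq n,
    show (fun num => PySem.Int.mod n num == 0) = (fun x => decide (PySem.Int.mod n x = 0)) from funext fun x => Bool.beq_eq_decide_eq _ _]
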